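-- pv_equiv track=rewrite | github.com/Qcraft-UEx/QCRAFT-Multi-Batch-Circuit-Scheduling | Multi-batch circuit scheduling/hellinger-complete.py | add_missing_keys
-- ===== SOURCE A (Python) =====
-- def add_missing_keys(d1, d2):
--     for key in d1.keys():
--         if key not in d2:
--             d2[key] = 0
--     for key in d2.keys():
--         if key not in d1:
--             d1[key] = 0
--     d1 = dict(sorted(d1.items()))
--     d2 = dict(sorted(d2.items()))
--     return d1, d2
-- ===== SOURCE B (Python) =====
-- def add_missing_keys(d1, d2):
--     # One symmetric pass over the sorted union of the key sets (return-value
--     # equivalence only: A pads d1/d2 in place, B leaves its arguments untouched).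
--     keys = sorted(d1.keys() | d2.keys())
--     return {k: d1.get(k, 0) for k in keys}, {k: d2.get(k, 0) for k in keys}
-- ===== Notes on version B (the rewrite author's own statement) =====
-- stated objective: simpler
-- what changed: Replaces A's two asymmetric scan-and-patch loops followed by two sort-and-rebuild steps with one symmetric pass: sort the union of the two key sets once, then build both result dicts directly by lookup with default 0; B does not mutate its arguments (A pads them in place), the return value is identical.
import Mathlib
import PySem

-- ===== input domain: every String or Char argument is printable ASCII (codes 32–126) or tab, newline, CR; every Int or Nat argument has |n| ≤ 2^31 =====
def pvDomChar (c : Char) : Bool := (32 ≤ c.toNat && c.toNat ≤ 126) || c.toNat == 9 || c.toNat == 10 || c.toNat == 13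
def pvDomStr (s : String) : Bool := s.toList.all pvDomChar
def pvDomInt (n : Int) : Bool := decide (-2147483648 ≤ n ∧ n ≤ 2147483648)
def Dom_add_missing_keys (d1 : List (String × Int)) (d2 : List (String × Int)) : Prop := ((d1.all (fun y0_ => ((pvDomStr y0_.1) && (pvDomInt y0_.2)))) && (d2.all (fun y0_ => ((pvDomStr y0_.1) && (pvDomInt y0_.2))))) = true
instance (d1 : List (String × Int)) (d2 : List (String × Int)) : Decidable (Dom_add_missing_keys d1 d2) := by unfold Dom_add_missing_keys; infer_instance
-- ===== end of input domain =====

-- B builds both results in one symmetric pass over the sorted union of the key sets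
-- instead of A's two scan-and-patch loops plus two sort-and-rebuild steps (objective:
-- simpler). Return-value equivalence only: A pads its arguments in place, B does not.

-- ===== PORT A =====
def add_missing_keys (d1 : List (String × Int)) (d2 : List (String × Int)) : (List (String × Int)) × (List (String × Int)) :=
  -- for key in d1.keys(): if key not in d2: d2[key] = 0
  let D1 := PySem.Dict.mk d1
  let D2 := PySem.Dict.mk d2
  let D2' := D1.keys.foldl (fun d key => if !(d.contains key) then d.insert key 0 else d) D2
  -- for key in d2.keys(): if key not in d1: d1[key] = 0   (d2 is already padded here)
  let D1' := D2'.keys.foldl (fun d key => if !(d.contains key) then d.insert key 0 else d) D1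
  -- d1 = dict(sorted(d1.items())); d2 = dict(sorted(d2.items())); return d1, d2
  ((PySem.Dict.ofList (PySem.List.sorted2 D1'.items Prod.fst Prod.snd)).items,
   (PySem.Dict.ofList (PySem.List.sorted2 D2'.items Prod.fst Prod.snd)).items)

-- ===== PORT B =====
def add_missing_keys_alt (d1 : List (String × Int)) (d2 : List (String × Int)) : (List (String × Int)) × (List (String × Int)) :=
  -- keys = sorted(d1.keys() | d2.keys())
  let keys := PySem.List.sorted (PySem.Set.union (PySem.Set.ofList (PySem.Dict.mk d1).keys) ((PySem.Dict.mk d2).keys)) (fun k => k) false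
  -- return {k: d1.get(k, 0) for k in keys}, {k: d2.get(k, 0) for k in keys}
  ((PySem.Dict.ofList (keys.map (fun k => (k, (PySem.Dict.mk d1).getD k 0)))).items,
   (PySem.Dict.ofList (keys.map (fun k => (k, (PySem.Dict.mk d2).getD k 0)))).items)

-- ===== PRECONDITION & SPEC =====
-- Pre_ admits exactly the association lists that represent Python dicts: keys within
-- each argument are distinct (a Python dict cannot carry a duplicate key at all).
def Pre_add_missing_keys (d1 : List (String × Int)) (d2 : List (String × Int)) : Prop :=
  (d1.map Prod.fst).Nodup ∧ (d2.map Prod.fst).Nodup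
instance (d1 : List (String × Int)) (d2 : List (String × Int)) : Decidable (Pre_add_missing_keys d1 d2) := by unfold Pre_add_missing_keys; infer_instance
def pvWitness_add_missing_keys : (List (String × Int)) × (List (String × Int)) := ([("a", 1)], [("b", 2)])
def Spec_add_missing_keys (d1 : List (String × Int)) (d2 : List (String × Int)) (out : (List (String × Int)) × (List (String × Int))) : Prop := out = add_missing_keys_alt d1 d2
instance (d1 : List (String × Int)) (d2 : List (String × Int)) (out : (List (String × Int)) × (List (String × Int))) : Decidable (Spec_add_missing_keys d1 d2 out) := by unfold Spec_add_missing_keys; infer_instance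

-- ===== CLAIM (what is proved, stated in full; the proofs are below) =====
def Claim_equal_add_missing_keys : Prop := ∀ (d1 : List (String × Int)) (d2 : List (String × Int)), Dom_add_missing_keys d1 d2 → Pre_add_missing_keys d1 d2 → Spec_add_missing_keys d1 d2 (add_missing_keys d1 d2)

-- ===== LEMMAS AND PROOFS =====

-- insertBy only compares the inserted element against list members
theorem insertBy_congr {α : Type} (f g : α → α → Bool) (x : α) (ys : List α)
    (h : ∀ b ∈ ys, f x b = g x b) :
    PySem.List.insertBy f x ys = PySem.List.insertBy g x ys := by
  induction ys with
  | nil => rfl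
  | cons y ys ih =>
    simp only [PySem.List.insertBy] at ih ⊢
    rw [h y (by simp)]
    by_cases hc : g x y = true
    · simp [hc]
    · simp only [hc, if_neg, Bool.false_eq_true, not_false_iff]
      rw [ih (fun b hb => h b (by simp [hb]))]

-- a foldl of insertBy depends on the comparator only on the elements involved
theorem foldl_insertBy_congr {α : Type} (f g : α → α → Bool) :
    ∀ (xs acc : List α),
      (∀ a b, (a ∈ xs ∨ a ∈ acc) → (b ∈ xs ∨ b ∈ acc) → f a b = g a b) →
      xs.foldl (fun acc x => PySem.List.insertBy f x acc) acc
        = xs.foldl (fun acc x => PySem.List.insertBy g x acc) acc := by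
  intro xs
  induction xs with
  | nil => intro acc h; rfl
  | cons x xs ih =>
    intro acc h
    simp only [List.foldl_cons]
    rw [insertBy_congr f g x acc (fun b hb => h x b (by simp) (Or.inr hb))]
    apply ih
    intro a b ha hb
    have mem : ∀ c, c ∈ PySem.List.insertBy g x acc → c ∈ (x :: xs) ∨ c ∈ acc := by
      intro c hc
      rcases (PySem.List.mem_insertBy g x c acc).1 hc with rfl | hc
      · exact Or.inl (by simp)
      · exact Or.inr hc
    rcases ha with ha | ha
    · rcases hb with hb | hb
      · exact h a b (Or.inl (by simp [ha])) (Or.inl (by simp [hb]))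
      · exact h a b (Or.inl (by simp [ha])) (mem b hb)
    · rcases hb with hb | hb
      · exact h a b (mem a ha) (Or.inl (by simp [hb]))
      · exact h a b (mem a ha) (mem b hb)

-- with pairwise-distinct first components, the tuple sort is the key sort
theorem sorted2_eq_sorted_of_nodup_keys (xs : List (String × Int))
    (h : (xs.map Prod.fst).Nodup) :
    PySem.List.sorted2 xs Prod.fst Prod.snd = PySem.List.sorted xs Prod.fst := by
  rw [PySem.List.sorted_eq_foldl_insertBy]
  show xs.foldl (fun acc x => PySem.List.insertBy
      (fun a b => decide (a.1 < b.1) || (!decide (b.1 < a.1) && decide (a.2 < b.2))) x acc) []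
    = _
  apply foldl_insertBy_congr
  intro a b ha hb
  simp only [List.mem_nil_iff, or_false] at ha hb
  by_cases hk : a.1 = b.1
  · have : a = b := List.inj_on_of_nodup_map h ha hb hk
    subst this
    simp
  · rcases lt_or_gt_of_ne hk with hlt | hgt
    · simp [hlt, not_lt_of_gt hlt]
    · simp [hgt, not_lt_of_gt hgt]

-- the padding loop of A appends one zero entry per fresh key
theorem pad_items (ks : List String) (h : ks.Nodup) : ∀ (d : PySem.Dict String Int),
    (ks.foldl (fun d key => if !(d.contains key) then d.insert key 0 else d) d).items
      = d.items ++ (ks.filter (fun key => !(d.contains key))).map (fun key => (key, (0 : Int))) := by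
  induction ks with
  | nil => intro d; simp
  | cons k ks ih =>
    intro d
    have hnd : ks.Nodup := h.of_cons
    have hk : k ∉ ks := by simp at h; exact h.1
    simp only [List.foldl_cons, List.filter_cons]
    by_cases hc : d.contains k = true
    · simp only [hc, Bool.not_true, Bool.false_eq_true, if_false]
      exact ih hnd d
    · have hc' : d.contains k = false := by simpa using hc
      simp only [hc', Bool.not_false, if_pos]
      rw [ih hnd (d.insert k 0)]
      rw [PySem.Dict.items_insert_of_not_contains d 0 hc']
      have hfc : ks.filter (fun key => !((d.insert k 0).contains key))
          = ks.filter (fun key => !(d.contains key)) := by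
        apply List.filter_congr
        intro x hx
        rw [PySem.Dict.contains_insert]
        have : (x == k) = false := by
          simp only [beq_eq_false_iff_ne, ne_eq]
          rintro rfl; exact hk hx
        simp [this]
      rw [hfc]
      simp

-- building a set by repeated add appends exactly the fresh elements
theorem foldl_set_add_eq (t : List String) (ht : t.Nodup) : ∀ (s : List String),
    t.foldl PySem.Set.add s = s ++ t.filter (fun x => !(s.contains x)) := by
  induction t with
  | nil => intro s; simp
  | cons x t ih =>
    intro s
    have hnd : t.Nodup := ht.of_cons
    have hx : x ∉ t := by simp at ht; exact ht.1
    simp only [List.foldl_cons, List.filter_cons, PySem.Set.add, PySem.Set.contains]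
    by_cases hc : s.contains x = true
    · simp only [hc, if_pos, Bool.not_true, Bool.false_eq_true, if_false]
      exact ih hnd s
    · have hc' : s.contains x = false := by simpa using hc
      simp only [hc', Bool.false_eq_true, if_false, Bool.not_false, if_true]
      rw [ih hnd (s ++ [x])]
      have hfc : t.filter (fun y => !((s ++ [x]).contains y))
          = t.filter (fun y => !(s.contains y)) := by
        apply List.filter_congr
        intro y hy
        have hne : (y == x) = false := by
          simp only [beq_eq_false_iff_ne, ne_eq]
          rintro rfl; exact hx hy
        simp only [List.contains_append]
        simp only [Bool.not_or]
        have hxy : [x].contains y = false := by simp [show y ≠ x from by simpa using hne]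
        rw [hxy]
        simp
      rw [hfc]
      simp

-- a dict built from a list with distinct keys reproduces that item list
theorem ofList_items_of_nodup (ps : List (String × Int)) (h : (ps.map Prod.fst).Nodup) :
    (PySem.Dict.ofList ps).items = ps := by
  show (List.foldl (fun acc p => acc.insert p.1 p.2) PySem.Dict.empty ps).items = ps
  rw [PySem.Dict.items_foldl_insert_fresh ps Prod.fst Prod.snd PySem.Dict.empty
    (fun a _ => PySem.Dict.contains_empty a.1) h]
  simp [PySem.Dict.empty]

-- zero-valued padding never changes a lookup with default 0
theorem getD_append_zero_pad (xs : List (String × Int)) (ks : List String) (k : String) :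
    (PySem.Dict.mk (xs ++ ks.map (fun key => (key, (0 : Int))))).getD k 0
      = (PySem.Dict.mk xs).getD k 0 := by
  simp only [PySem.Dict.getD, PySem.Dict.get?, List.find?_append]
  cases hf : List.find? (fun p => p.1 == k) xs with
  | some p => simp
  | none =>
    simp only [Option.none_or]
    cases hg : List.find? (fun p => p.1 == k) (ks.map (fun key => (key, (0:Int)))) with
    | none => simp
    | some q =>
      have := List.mem_of_find?_eq_some hg
      simp only [List.mem_map] at this
      obtain ⟨a, _, rfl⟩ := this
      simp

theorem contains_mk_eq (xs : List (String × Int)) (k : String) :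
    (PySem.Dict.mk xs).contains k = decide (k ∈ xs.map Prod.fst) := by
  by_cases h : k ∈ xs.map Prod.fst
  · simp only [h, decide_true]
    simp only [List.mem_map] at h
    obtain ⟨p, hp, rfl⟩ := h
    simp only [PySem.Dict.contains, List.any_eq_true]
    exact ⟨p, hp, by simp⟩
  · simp only [h, decide_false]
    simp only [List.mem_map, not_exists] at h
    simp only [PySem.Dict.contains, List.any_eq_false]
    intro p hp
    simp only [beq_iff_eq]
    exact fun he => (h p) ⟨hp, he⟩

theorem list_contains_eq (s : List String) (k : String) :
    s.contains k = decide (k ∈ s) := by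
  simp

-- shared shape: sorting a nodup-key item list is mapping over its sorted key set
theorem side_eq (L : List (String × Int)) (U : List String)
    (hndL : (L.map Prod.fst).Nodup) (hndU : U.Nodup)
    (hperm : U.Perm (L.map Prod.fst)) :
    (PySem.Dict.ofList (PySem.List.sorted2 L Prod.fst Prod.snd)).items
      = (PySem.List.sorted U (fun k => k) false).map (fun k => (k, (PySem.Dict.mk L).getD k 0)) := by
  set f : String → String × Int := fun k => (k, (PySem.Dict.mk L).getD k 0) with hf
  set ks : List String := PySem.List.sorted U (fun k => k) false with hks
  have hkperm : ks.Perm U := PySem.List.sorted_perm U (fun k => k) false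
  have hknd : ks.Nodup := hndU.perm hkperm.symm
  have hkle : List.Pairwise (fun a b => a ≤ b) ks := PySem.List.sorted_pairwise U (fun k => k)
  have hklt : List.Pairwise (fun a b : String => a < b) ks := by
    have := List.Pairwise.and hkle hknd
    exact this.imp (fun {a b} hab => lt_of_le_of_ne hab.1 hab.2)
  have hLmap : L = (L.map Prod.fst).map f := by
    have := PySem.Dict.items_eq_map_keys (PySem.Dict.mk L)
      (by rw [PySem.Dict.keys_mk]; exact hndL) (0 : Int)
    simpa [PySem.Dict.keys_mk, hf] using this
  have hperm2 : (ks.map f).Perm L := by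
    conv_rhs => rw [hLmap]
    exact (hkperm.trans hperm).map f
  have hpw : List.Pairwise (fun a b : String × Int => a.1 < b.1) (ks.map f) := by
    rw [List.pairwise_map]
    simpa [hf] using hklt
  rw [sorted2_eq_sorted_of_nodup_keys L hndL]
  rw [PySem.List.sorted_eq_of_perm_of_pairwise_lt L (ks.map f) Prod.fst hperm2 hpw]
  apply ofList_items_of_nodup
  have : (ks.map f).map Prod.fst = ks := by
    rw [List.map_map]
    exact List.map_id' ks
  rw [this]
  exact hknd

-- the central equivalence, stated on raw arguments
theorem add_missing_keys_agree (d1 d2 : List (String × Int))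
    (hn1 : (d1.map Prod.fst).Nodup) (hn2 : (d2.map Prod.fst).Nodup) :
    add_missing_keys d1 d2 = add_missing_keys_alt d1 d2 := by
  -- names
  set K1 := d1.map Prod.fst with hK1
  set K2 := d2.map Prod.fst with hK2
  set F12 := K1.filter (fun key => !((PySem.Dict.mk d2).contains key)) with hF12
  set G := K2.filter (fun key => !((PySem.Dict.mk d1).contains key)) with hG
  -- disjointness facts
  have hF12K1 : ∀ k ∈ F12, k ∈ K1 := fun k hk => (List.mem_filter.1 hk).1
  have hF12notK2 : ∀ k ∈ F12, k ∉ K2 := by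
    intro k hk
    have := (List.mem_filter.1 hk).2
    rw [contains_mk_eq, ← hK2] at this
    simpa using this
  have hGnotK1 : ∀ k ∈ G, k ∉ K1 := by
    intro k hk
    have := (List.mem_filter.1 hk).2
    rw [contains_mk_eq, ← hK1] at this
    simpa using this
  have hndF12 : F12.Nodup := hn1.filter _
  have hndG : G.Nodup := hn2.filter _
  have hnd12 : (K2 ++ F12).Nodup := by
    rw [List.nodup_append]
    refine ⟨hn2, hndF12, ?_⟩
    intro a ha b hb heq
    subst heq
    exact hF12notK2 a hb ha
  have hnd1G : (K1 ++ G).Nodup := by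
    rw [List.nodup_append]
    refine ⟨hn1, hndG, ?_⟩
    intro a ha b hb heq
    subst heq
    exact hGnotK1 a hb ha
  -- the union list of B
  have hUofK1 : PySem.Set.ofList K1 = K1 := by
    rw [PySem.Set.ofList_eq_foldl, foldl_set_add_eq K1 hn1 []]
    simp
  have hU : PySem.Set.union (PySem.Set.ofList K1) K2
      = K1 ++ K2.filter (fun x => !(K1.contains x)) := by
    show K2.foldl PySem.Set.add (PySem.Set.ofList K1) = _
    rw [hUofK1, foldl_set_add_eq K2 hn2 K1]
  -- U coincides with the key list of the padded d1
  have hUG : K1 ++ K2.filter (fun x => !(K1.contains x)) = K1 ++ G := by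
    congr 1
    apply List.filter_congr
    intro x hx
    rw [list_contains_eq, contains_mk_eq]
  have hndU : (K1 ++ G).Nodup := hnd1G
  -- A's first padding loop
  have hD2' : ((d1.map Prod.fst).foldl
        (fun d key => if !(d.contains key) then d.insert key 0 else d) (PySem.Dict.mk d2)).items
      = d2 ++ F12.map (fun key => (key, (0 : Int))) := by
    rw [pad_items _ hn1]
  have hkeys2 : ∀ D : PySem.Dict String Int, D.items = d2 ++ F12.map (fun key => (key, (0 : Int))) →
      D.keys = K2 ++ F12 := by
    intro D hD
    rw [PySem.Dict.keys, hD, List.map_append, List.map_map]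
    rw [show ((fun x : String × Int => x.1) ∘ fun key => (key, (0 : Int))) = fun k : String => k from rfl,
       List.map_id']
  -- A's second padding loop
  have hD1' : ((K2 ++ F12).foldl
        (fun d key => if !(d.contains key) then d.insert key 0 else d) (PySem.Dict.mk d1)).items
      = d1 ++ G.map (fun key => (key, (0 : Int))) := by
    rw [pad_items _ hnd12]
    congr 2
    rw [List.filter_append]
    have hnil : F12.filter (fun key => !((PySem.Dict.mk d1).contains key)) = [] := by
      rw [List.filter_eq_nil_iff]
      intro k hk
      have hkK1 : k ∈ K1 := hF12K1 k hk
      rw [contains_mk_eq, ← hK1]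
      simp [hkK1]
    rw [hnil, List.append_nil]
  -- nodup of the padded key lists
  have hmapG : (d1 ++ G.map (fun key => (key, (0 : Int)))).map Prod.fst = K1 ++ G := by
    simp only [List.map_append, List.map_map,
      show (Prod.fst ∘ fun key : String => (key, (0 : Int))) = fun k : String => k from rfl,
      List.map_id']
    rw [← hK1]
  have hmapF : (d2 ++ F12.map (fun key => (key, (0 : Int)))).map Prod.fst = K2 ++ F12 := by
    simp only [List.map_append, List.map_map,
      show (Prod.fst ∘ fun key : String => (key, (0 : Int))) = fun k : String => k from rfl,
      List.map_id']
    rw [← hK2]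
  -- the two sides
  have hside1 : (PySem.Dict.ofList (PySem.List.sorted2
        (d1 ++ G.map (fun key => (key, (0 : Int)))) Prod.fst Prod.snd)).items
      = (PySem.List.sorted (K1 ++ G) (fun k => k) false).map
          (fun k => (k, (PySem.Dict.mk d1).getD k 0)) := by
    rw [side_eq _ (K1 ++ G) (hmapG ▸ hnd1G) hnd1G (hmapG ▸ List.Perm.refl _)]
    apply List.map_congr_left
    intro k _
    rw [getD_append_zero_pad]
  have hside2 : (PySem.Dict.ofList (PySem.List.sorted2
        (d2 ++ F12.map (fun key => (key, (0 : Int)))) Prod.fst Prod.snd)).items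
      = (PySem.List.sorted (K1 ++ G) (fun k => k) false).map
          (fun k => (k, (PySem.Dict.mk d2).getD k 0)) := by
    have hperm : (K1 ++ G).Perm (K2 ++ F12) := by
      rw [List.perm_ext_iff_of_nodup hnd1G hnd12]
      intro a
      simp only [List.mem_append, hG, hF12, List.mem_filter, contains_mk_eq, ← hK1, ← hK2,
        Bool.not_eq_eq_eq_not, Bool.not_true, decide_eq_false_iff_not]
      by_cases h1 : a ∈ K1 <;> by_cases h2 : a ∈ K2 <;> simp [h1, h2]
    rw [side_eq _ (K1 ++ G) (hmapF ▸ hnd12) hnd1G (hmapF ▸ hperm)]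
    apply List.map_congr_left
    intro k _
    rw [getD_append_zero_pad]
  -- B's components reproduce their item lists
  have hBnodup : ∀ (dx : List (String × Int)),
      ((PySem.List.sorted (K1 ++ G) (fun k => k) false).map
        (fun k => (k, (PySem.Dict.mk dx).getD k 0))).map Prod.fst
        = PySem.List.sorted (K1 ++ G) (fun k => k) false := by
    intro dx
    rw [List.map_map]
    exact List.map_id' _
  have hsortnd : (PySem.List.sorted (K1 ++ G) (fun k => k) false).Nodup :=
    hnd1G.perm (PySem.List.sorted_perm (K1 ++ G) (fun k => k) false).symm
  -- assemble
  have hfst : (fun x : String × Int => x.1) = Prod.fst := rfl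
  simp only [add_missing_keys, add_missing_keys_alt, PySem.Dict.keys, hfst]
  rw [hD2', hmapF, hD1', hside1, hside2, hU, hUG]
  rw [ofList_items_of_nodup _ ((hBnodup d1).symm ▸ hsortnd),
      ofList_items_of_nodup _ ((hBnodup d2).symm ▸ hsortnd)]


-- ===== VERDICT (by name: the statement is the Claim_ definition above) =====
theorem add_missing_keys_spec : Claim_equal_add_missing_keys := by
  intro d1 d2 _ hpre
  unfold Spec_add_missing_keys
  exact add_missing_keys_agree d1 d2 hpre.1 hpre.2
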